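-- pv_equiv track=rewrite | github.com/Kosaki-1AE/Dancemotion | Emotion_Sketch/main/word_scale.py | map_consonants_to_scale
-- ===== SOURCE A (Python) =====
-- def map_consonants_to_scale(text):
--     # 子音 → ドレミ音階のマッピング これを色々変更していきます、はい。
--     consonant = {
--         'a': 'C',
--         'b': 'C#',
--         'c': 'D',
--         'd': 'D#',
--         'e': 'E',
--         'f': 'F',
--         'g': 'F#',
--         'h': 'G',
--         'i': 'G#',
--         'j': 'A',
--         'k': 'A#',
--         'l': 'B',
--         'm': 'C',
--         'n': 'C#',
--         'o': 'D',
--         'p': 'D#',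
--         'q': 'E',
--         'r': 'F',
--         's': 'F#',
--         'ss': 'F#',
--         't': 'G',
--         'u': 'G#',
--         'v': 'A',
--         'w': 'A#',
--         'x': 'B',
--         'y': 'C',
--         'z': 'C#',
--         'ar': 'M',
--         'ee': 'M',
--         'ea': 'M',
--         'oo': 'M',
--         'dg': 'M',
--         'ch': 'M',
--         'tch': 'F#',
--         'th': 'M',
--         'ts': 'F#',
--         'sh': 'M',
--         'zh': 'M',
--         'si': 'M',
--         'ng': 'M',
--         'aw': 'M',
--         'or': 'M',
--         'ay': 'M',
--         'ei': 'M',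
--         'igh': 'M',
--         'ow': 'M',
--         'ou': 'M',
--         'oi': 'M',
--         'oy': 'M'
--     }
--
--     notes = []
--     for char in text.lower():
--         if char in consonant:
--             notes.append(consonant[char])
--     return notes
-- ===== SOURCE B (Python) =====
-- SCALE = ['C', 'C#', 'D', 'D#', 'E', 'F', 'F#', 'G', 'G#', 'A', 'A#', 'B']
--
-- def map_consonants_to_scale(text):
--     notes = []
--     for char in text.lower():
--         if 'a' <= char <= 'z':
--             notes.append(SCALE[(ord(char) - 97) % 12])
--     return notes
-- ===== Notes on version B (the rewrite author's own statement) =====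
-- stated objective: simpler
-- what changed: Replaces A's 49-entry dictionary (whose multi-character keys can never match a single character of the loop) with a 12-element chromatic scale list indexed by the closed form (ord(c)-97) % 12 under an ASCII-lowercase-letter range guard.
import Mathlib
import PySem

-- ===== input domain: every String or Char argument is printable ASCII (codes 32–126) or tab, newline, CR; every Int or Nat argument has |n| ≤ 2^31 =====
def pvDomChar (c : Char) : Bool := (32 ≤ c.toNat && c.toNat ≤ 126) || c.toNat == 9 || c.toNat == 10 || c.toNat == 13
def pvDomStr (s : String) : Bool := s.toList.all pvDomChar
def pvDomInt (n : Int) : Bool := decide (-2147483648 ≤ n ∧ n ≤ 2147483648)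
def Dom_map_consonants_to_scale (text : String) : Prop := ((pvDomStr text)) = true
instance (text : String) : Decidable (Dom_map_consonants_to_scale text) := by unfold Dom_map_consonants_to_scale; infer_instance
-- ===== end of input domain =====

-- B replaces A's 49-entry dictionary lookup (whose multi-char keys can never match a single
-- character) by a 12-element chromatic-scale list indexed with the closed form (ord(c)-97) % 12;
-- objective: simpler.

set_option maxRecDepth 8192

-- ===== PORT A =====
-- A's dict literal: keys are the Python strings as List Char, insertion order kept.
def consonantA : PySem.Dict (List Char) String := PySem.Dict.ofList [
  (['a'],"C"),(['b'],"C#"),(['c'],"D"),(['d'],"D#"),(['e'],"E"),(['f'],"F"),(['g'],"F#"),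
  (['h'],"G"),(['i'],"G#"),(['j'],"A"),(['k'],"A#"),(['l'],"B"),(['m'],"C"),(['n'],"C#"),
  (['o'],"D"),(['p'],"D#"),(['q'],"E"),(['r'],"F"),(['s'],"F#"),(['s','s'],"F#"),(['t'],"G"),
  (['u'],"G#"),(['v'],"A"),(['w'],"A#"),(['x'],"B"),(['y'],"C"),(['z'],"C#"),
  (['a','r'],"M"),(['e','e'],"M"),(['e','a'],"M"),(['o','o'],"M"),(['d','g'],"M"),(['c','h'],"M"),
  (['t','c','h'],"F#"),(['t','h'],"M"),(['t','s'],"F#"),(['s','h'],"M"),(['z','h'],"M"),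
  (['s','i'],"M"),(['n','g'],"M"),(['a','w'],"M"),(['o','r'],"M"),(['a','y'],"M"),(['e','i'],"M"),
  (['i','g','h'],"M"),(['o','w'],"M"),(['o','u'],"M"),(['o','i'],"M"),(['o','y'],"M")]

-- for char in text.lower(): if char in consonant: notes.append(consonant[char])
def map_consonants_to_scale (text : String) : List String :=
  (PySem.Str.lower text).toList.foldl
    (fun notes char =>
      match consonantA.get? [char] with
      | some v => notes ++ [v]
      | none => notes) []

-- ===== PORT B =====
def scaleB : List String := ["C","C#","D","D#","E","F","F#","G","G#","A","A#","B"]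

-- for char in text.lower(): if 'a' <= char <= 'z': notes.append(SCALE[(ord(char) - 97) % 12])
def map_consonants_to_scale_alt (text : String) : List String :=
  (PySem.Str.lower text).toList.foldl
    (fun notes c =>
      if 'a' ≤ c ∧ c ≤ 'z'
      then notes ++ [PySem.List.pyGetD scaleB (PySem.Int.mod ((c.toNat : Int) - 97) 12) ""]
      else notes) []

-- ===== PRECONDITION & SPEC =====
def Spec_map_consonants_to_scale (text : String) (out : List String) : Prop := out = map_consonants_to_scale_alt text
instance (text : String) (out : List String) : Decidable (Spec_map_consonants_to_scale text out) := by unfold Spec_map_consonants_to_scale; infer_instance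

-- ===== CLAIM (what is proved, stated in full; the proofs are below) =====
def Claim_equal_map_consonants_to_scale : Prop := ∀ (text : String), Dom_map_consonants_to_scale text → Spec_map_consonants_to_scale text (map_consonants_to_scale text)

-- ===== LEMMAS AND PROOFS =====

-- per-character agreement of the two loop bodies, verified over all ASCII codes < 127
theorem keyfact : ∀ n < 127, consonantA.get? [Char.ofNat n] =
    (if 'a' ≤ Char.ofNat n ∧ Char.ofNat n ≤ 'z'
     then some (PySem.List.pyGetD scaleB (PySem.Int.mod (((Char.ofNat n).toNat : Int) - 97) 12) "")
     else none) := by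
  decide

-- lowercasing an ASCII character stays in ASCII
theorem lowfact : ∀ n < 127, (PySem.Chars.lowerChar (Char.ofNat n)).toNat < 127 := by
  decide

theorem step_eq (c : Char) (h : c.toNat < 127) :
    consonantA.get? [c] =
    (if 'a' ≤ c ∧ c ≤ 'z'
     then some (PySem.List.pyGetD scaleB (PySem.Int.mod ((c.toNat : Int) - 97) 12) "")
     else none) := by
  have := keyfact c.toNat h
  rwa [Char.ofNat_toNat] at this

theorem fold_eq (l : List Char) (hl : ∀ c ∈ l, c.toNat < 127) (acc : List String) :
    l.foldl (fun notes char =>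
        match consonantA.get? [char] with
        | some v => notes ++ [v]
        | none => notes) acc
    = l.foldl (fun notes c =>
        if 'a' ≤ c ∧ c ≤ 'z'
        then notes ++ [PySem.List.pyGetD scaleB (PySem.Int.mod ((c.toNat : Int) - 97) 12) ""]
        else notes) acc := by
  induction l generalizing acc with
  | nil => rfl
  | cons c tl ih =>
    have hc := hl c (List.mem_cons_self ..)
    have htl : ∀ x ∈ tl, x.toNat < 127 := fun x hx => hl x (List.mem_cons_of_mem _ hx)
    simp only [List.foldl_cons, step_eq c hc]
    split_ifs <;> exact ih htl _

-- ===== VERDICT (by name: the statement is the Claim_ definition above) =====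
theorem map_consonants_to_scale_spec : Claim_equal_map_consonants_to_scale := by
  intro text hdom
  unfold Spec_map_consonants_to_scale map_consonants_to_scale map_consonants_to_scale_alt
  apply fold_eq
  intro c hc
  rw [PySem.Str.toList_lower] at hc
  have hmap : PySem.Chars.lower text.toList = text.toList.map PySem.Chars.lowerChar := rfl
  rw [hmap] at hc
  obtain ⟨c0, hc0, rfl⟩ := List.mem_map.mp hc
  have hd : pvDomChar c0 = true := by
    have := (List.all_eq_true.mp hdom) c0 hc0
    exact this
  have h127 : c0.toNat < 127 := by
    simp [pvDomChar] at hd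
    omega
  have := lowfact c0.toNat h127
  rwa [Char.ofNat_toNat] at this
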